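-- pv_equiv track=rewrite | github.com/sanial2001/6Companies30days | smallest_number_following_pattern.py | solve
-- ===== SOURCE A (Python) =====
-- def solve(word):
--     cnt = 1
--     stack = []
--     res = ''
--     for char in word:
--         if char == 'D':
--             stack.append(cnt)
--             cnt += 1
--         elif char == 'I':
--             stack.append(cnt)
--             cnt += 1
--             while len(stack) > 0:
--                 res += str(stack.pop())
--     stack.append(cnt)
--     while len(stack) > 0:
--         res += str(stack.pop())
--     return res
-- ===== SOURCE B (Python) =====
-- def _build(p, start):
--     # count the leading run of 'D's
--     k = 0
--     while k < len(p) and p[k] == 'D':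
--         k += 1
--     # the run of k D's together with its terminator yields the descending
--     # block start+k, start+k-1, ..., start
--     res = ''.join(str(x) for x in range(start + k, start - 1, -1))
--     if k < len(p):
--         return res + _build(p[k + 1:], start + k + 1)
--     return res
--
--
-- def solve(word):
--     pattern = [c for c in word if c == 'D' or c == 'I']
--     return _build(pattern, 1)
-- ===== Notes on version B (the rewrite author's own statement) =====
-- stated objective: simpler
-- what changed: Replaces A's incremental stack with build-and-flush by a two-step decomposition: filter out the D/I pattern, then recurse over it emitting each maximal D-run (plus its terminator) as a closed-form descending range of numbers; no stack is maintained.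
import Mathlib
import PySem

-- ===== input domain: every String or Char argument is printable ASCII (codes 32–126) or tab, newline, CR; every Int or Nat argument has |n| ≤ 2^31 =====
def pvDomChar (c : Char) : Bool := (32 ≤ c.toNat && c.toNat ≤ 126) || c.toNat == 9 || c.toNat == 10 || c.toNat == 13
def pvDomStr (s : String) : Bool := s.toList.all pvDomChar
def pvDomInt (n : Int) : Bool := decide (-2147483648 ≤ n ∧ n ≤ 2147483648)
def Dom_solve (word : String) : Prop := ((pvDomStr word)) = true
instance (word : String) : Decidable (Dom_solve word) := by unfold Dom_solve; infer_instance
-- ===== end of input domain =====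

-- B replaces A's stack-build-and-flush with filtering the D/I pattern and emitting one
-- closed-form descending block per run of D's, by recursion on the pattern (objective: simpler).


-- ===== PORT A =====
-- the Python list `stack` (append/pop at the end) is modelled with the most recent
-- element at the HEAD; `while stack: res += str(stack.pop())` is then a left fold.
def flushA (stack : List Int) (res : String) : String :=
  stack.foldl (fun r x => r ++ PySem.Int.toStr x) res

def stepA (st : Int × List Int × String) (c : Char) : Int × List Int × String :=
  let (cnt, stack, res) := st
  if c = 'D' then (cnt + 1, cnt :: stack, res)
  else if c = 'I' then (cnt + 1, [], flushA (cnt :: stack) res)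
  else (cnt, stack, res)

def solve (word : String) : String :=
  let st := word.toList.foldl stepA (1, [], "")
  flushA (st.1 :: st.2.1) st.2.2

-- ===== PORT B =====
-- port of Source B's _build: leadD is the while loop counting the leading run of 'D's
def leadD : List Char → Nat
  | [] => 0
  | c :: p => if c = 'D' then leadD p + 1 else 0

def buildB (p : List Char) (start : Int) : String :=
  let k := leadD p
  let res := (PySem.List.pyRange (start + k) (start - 1) (-1)).foldl
      (fun a x => a ++ PySem.Int.toStr x) ""
  if h : k < p.length then res ++ buildB (p.drop (k + 1)) (start + k + 1)
  else res
termination_by p.length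
decreasing_by simp; omega

def solve_alt (word : String) : String :=
  buildB (word.toList.filter (fun c => c = 'D' || c = 'I')) 1

-- ===== PRECONDITION & SPEC =====
def Spec_solve (word : String) (out : String) : Prop := out = solve_alt word
instance (word : String) (out : String) : Decidable (Spec_solve word out) := by unfold Spec_solve; infer_instance

-- ===== CLAIM (what is proved, stated in full; the proofs are below) =====
def Claim_equal_solve : Prop := ∀ (word : String), Dom_solve word → Spec_solve word (solve word)

-- ===== LEMMAS AND PROOFS =====

-- the descending stack s+j-1, s+j-2, …, s
def descL (s : Int) : Nat → List Int
  | 0 => []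
  | j + 1 => (s + j) :: descL s j

theorem pyRange_desc (s : Int) (j : Nat) :
    PySem.List.pyRange (s + j) (s - 1) (-1) = (s + j) :: descL s j := by
  induction j generalizing s with
  | zero =>
    simp only [Nat.cast_zero, add_zero]
    rw [PySem.List.pyRange_neg_one_cons (by omega),
        PySem.List.pyRange_neg_one_eq_nil (by omega : s - 1 ≤ s - 1)]
    simp [descL]
  | succ j ih =>
    rw [PySem.List.pyRange_neg_one_cons (by push_cast; omega)]
    have h1 : (s : Int) + (j + 1 : Nat) - 1 = s + j := by push_cast; omega
    rw [h1, ih]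
    simp [descL]

theorem flushA_out (stack : List Int) (res : String) :
    flushA stack res = res ++ flushA stack "" := by
  induction stack generalizing res with
  | nil => simp [flushA]
  | cons x t ih =>
    simp only [flushA, List.foldl_cons] at *
    rw [ih (res ++ PySem.Int.toStr x), ih ("" ++ PySem.Int.toStr x)]
    simp [String.append_assoc]

-- generalised invariant: from a state whose stack is the descending run s+j-1 … s
-- (so cnt = s + j), running A on the rest and flushing equals res ++ the block view,
-- where the pending j D's merge with the leading D's of the remaining pattern.
def blockB (j : Nat) (p : List Char) (s : Int) : String :=
  let k := leadD p
  let res := (PySem.List.pyRange (s + (j + k : Nat)) (s - 1) (-1)).foldl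
      (fun a x => a ++ PySem.Int.toStr x) ""
  if k < p.length then res ++ buildB (p.drop (k + 1)) (s + (j + k : Nat) + 1)
  else res

theorem buildB_eq_blockB (p : List Char) (s : Int) : buildB p s = blockB 0 p s := by
  rw [buildB, blockB]
  simp

theorem blockB_nil (j : Nat) (s : Int) :
    blockB j [] s =
      (PySem.List.pyRange (s + j) (s - 1) (-1)).foldl (fun a x => a ++ PySem.Int.toStr x) "" := by
  rw [blockB]
  simp [leadD]

theorem blockB_cons_D (j : Nat) (p : List Char) (s : Int) :
    blockB j ('D' :: p) s = blockB (j + 1) p s := by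
  rw [blockB, blockB]
  have h1 : (j + (leadD p + 1) : Nat) = ((j + 1) + leadD p : Nat) := by omega
  simp only [leadD, if_true, h1, List.length_cons, List.drop_succ_cons]
  exact if_congr (by omega) rfl rfl

theorem blockB_cons_I (j : Nat) (p : List Char) (s : Int) :
    blockB j ('I' :: p) s =
      ((PySem.List.pyRange (s + j) (s - 1) (-1)).foldl (fun a x => a ++ PySem.Int.toStr x) "")
        ++ buildB p (s + j + 1) := by
  rw [blockB]
  simp [leadD]

theorem main_inv (cs : List Char) (s : Int) (j : Nat) (res : String) :
    (let st := cs.foldl stepA (s + j, descL s j, res)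
     flushA (st.1 :: st.2.1) st.2.2) =
      res ++ blockB j (cs.filter (fun c => c = 'D' || c = 'I')) s := by
  induction cs generalizing s j res with
  | nil =>
    show flushA ((s + j) :: descL s j) res = res ++ blockB j [] s
    rw [blockB_nil, pyRange_desc, flushA_out, flushA]
  | cons c cs ih =>
    by_cases hD : c = 'D'
    · subst hD
      show (let st := cs.foldl stepA (stepA (s + j, descL s j, res) 'D')
            flushA (st.1 :: st.2.1) st.2.2) = _
      have hst : stepA (s + j, descL s j, res) 'D' = (s + (j + 1 : Nat), descL s (j + 1), res) := by
        simp [stepA, descL]; ring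
      rw [hst, ih]
      simp [blockB_cons_D]
    · by_cases hI : c = 'I'
      · subst hI
        show (let st := cs.foldl stepA (stepA (s + j, descL s j, res) 'I')
              flushA (st.1 :: st.2.1) st.2.2) = _
        have hst : stepA (s + j, descL s j, res) 'I'
            = ((s + j + 1) + (0 : Nat), descL (s + j + 1) 0, flushA ((s + j) :: descL s j) res) := by
          simp [stepA, descL]
        rw [hst, ih]
        have hf : List.filter (fun c => c = 'D' || c = 'I') ('I' :: cs)
            = 'I' :: List.filter (fun c => c = 'D' || c = 'I') cs := by simp
        rw [hf]
        rw [flushA_out, blockB_cons_I, ← buildB_eq_blockB, pyRange_desc, flushA]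
        simp [String.append_assoc]
      · show (let st := cs.foldl stepA (stepA (s + j, descL s j, res) c)
              flushA (st.1 :: st.2.1) st.2.2) = _
        have hst : stepA (s + j, descL s j, res) c = (s + j, descL s j, res) := by
          simp [stepA, hD, hI]
        rw [hst, ih]
        simp [hD, hI]

-- ===== VERDICT (by name: the statement is the Claim_ definition above) =====
theorem solve_spec : Claim_equal_solve := by
  intro word _
  show solve word = solve_alt word
  rw [solve, solve_alt, buildB_eq_blockB]
  have h := main_inv word.toList 1 0 ""
  simpa [descL] using h
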